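-- pv_equiv track=rewrite | github.com/probabilis/comp | Ex2/03_poisson_equation.py | faraday_cage
-- ===== SOURCE A (Python) =====
-- def faraday_cage(i, N):
--
--     # bottom rim
--     for k in range((N//4)*N + N//4, (N//4)*N + (N*3)//4):
--         if i == k:
--             return True
--     # top rim
--     for k in range((N*3)//4 * N + N//4, (N*3)//4 * N + (N*3)//4):
--         if i == k:
--             return True
--     # left rim
--     for k in [(N//4 + i)*N + N//4 for i in range(N//2)]:
--         if i == k:
--             return True
--     # right rim
--     for k in [(N//4 + i)*N + (N*3)//4 for i in range(N//2)]:
--         if i == k: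
--             return True
-- ===== SOURCE B (Python) =====
-- def faraday_cage(i, N):
--     # O(1): arithmetic membership tests instead of scanning the rim cells.
--     q = N // 4
--     t = (N * 3) // 4
--     h = N // 2
--     base = q * N
--     if base + q <= i < base + t:            # bottom rim
--         return True
--     top = t * N
--     if top + q <= i < top + t:              # top rim
--         return True
--     if N != 0:
--         for c in (q, t):                    # left rim (c=q), right rim (c=t)
--             r = i - c
--             if r % N == 0 and 0 <= r // N - q < h:
--                 return True
--     return None
-- ===== Notes on version B (the rewrite author's own statement) =====
-- stated objective: faster
-- what changed: Replaced A's four O(N) scans over generated rim-cell lists (two ranges, two comprehensions) by O(1) arithmetic interval bounds and a divisibility/quotient-bound test for the vertical rims.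
import Mathlib
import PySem

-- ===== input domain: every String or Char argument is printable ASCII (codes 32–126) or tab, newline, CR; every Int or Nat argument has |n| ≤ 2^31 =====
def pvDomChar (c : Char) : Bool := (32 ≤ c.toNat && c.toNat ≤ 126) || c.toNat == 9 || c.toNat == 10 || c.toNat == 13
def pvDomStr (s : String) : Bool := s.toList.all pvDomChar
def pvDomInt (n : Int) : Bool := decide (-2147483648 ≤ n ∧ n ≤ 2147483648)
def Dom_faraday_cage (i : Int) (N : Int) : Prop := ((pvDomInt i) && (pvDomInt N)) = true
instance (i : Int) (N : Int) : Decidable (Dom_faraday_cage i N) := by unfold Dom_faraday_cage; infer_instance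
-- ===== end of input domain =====

-- B replaces A's four O(N) scans over rim-cell lists by O(1) arithmetic interval/divisibility tests.

-- ===== PORT A =====
-- 'for k in ks: if i == k: return True' as a first-match scan
def pvScan (i : Int) : List Int → Bool
  | [] => false
  | k :: ks => if i = k then true else pvScan i ks

def faraday_cage (i : Int) (N : Int) : Option Bool :=
  -- bottom rim
  if pvScan i (PySem.List.pyRange ((PySem.Int.floordiv N 4) * N + PySem.Int.floordiv N 4)
                                  ((PySem.Int.floordiv N 4) * N + PySem.Int.floordiv (N*3) 4) 1) then some true
  -- top rim
  else if pvScan i (PySem.List.pyRange ((PySem.Int.floordiv (N*3) 4) * N + PySem.Int.floordiv N 4)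
                                       ((PySem.Int.floordiv (N*3) 4) * N + PySem.Int.floordiv (N*3) 4) 1) then some true
  -- left rim
  else if pvScan i ((PySem.List.pyRange 0 (PySem.Int.floordiv N 2) 1).map
                      (fun j => (PySem.Int.floordiv N 4 + j) * N + PySem.Int.floordiv N 4)) then some true
  -- right rim
  else if pvScan i ((PySem.List.pyRange 0 (PySem.Int.floordiv N 2) 1).map
                      (fun j => (PySem.Int.floordiv N 4 + j) * N + PySem.Int.floordiv (N*3) 4)) then some true
  else none

-- ===== PORT B =====
-- the vertical-rim test of Source B's 2-element 'for c in (q, t)' loop, for one offset c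
def pvVert (i N q h c : Int) : Bool :=
  PySem.Int.mod (i - c) N = 0 ∧ 0 ≤ PySem.Int.floordiv (i - c) N - q ∧ PySem.Int.floordiv (i - c) N - q < h

def faraday_cage_alt (i : Int) (N : Int) : Option Bool :=
  let q := PySem.Int.floordiv N 4
  let t := PySem.Int.floordiv (N*3) 4
  let h := PySem.Int.floordiv N 2
  let base := q * N
  if base + q ≤ i ∧ i < base + t then some true          -- bottom rim
  else
    let top := t * N
    if top + q ≤ i ∧ i < top + t then some true          -- top rim
    else if N ≠ 0 ∧ (pvVert i N q h q ∨ pvVert i N q h t) then some true   -- left/right rim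
    else none

-- ===== PRECONDITION & SPEC =====
def Spec_faraday_cage (i : Int) (N : Int) (out : Option Bool) : Prop := out = faraday_cage_alt i N
instance (i : Int) (N : Int) (out : Option Bool) : Decidable (Spec_faraday_cage i N out) := by unfold Spec_faraday_cage; infer_instance

-- ===== CLAIM (what is proved, stated in full; the proofs are below) =====
def Claim_equal_faraday_cage : Prop := ∀ (i : Int) (N : Int), Dom_faraday_cage i N → Spec_faraday_cage i N (faraday_cage i N)

-- ===== LEMMAS AND PROOFS =====

theorem pvScan_eq_mem (i : Int) (ks : List Int) : pvScan i ks = true ↔ i ∈ ks := by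
  induction ks with
  | nil => simp [pvScan]
  | cons k ks ih =>
    simp only [pvScan, List.mem_cons]
    by_cases h : i = k <;> simp [h, ih]

theorem pvScan_range (i a b : Int) :
    pvScan i (PySem.List.pyRange a b 1) = true ↔ a ≤ i ∧ i < b := by
  rw [pvScan_eq_mem, PySem.List.mem_pyRange_one]

theorem pvVert_iff (i N q h c : Int) (hN : N ≠ 0) :
    pvVert i N q h c = true ↔ ∃ j, (0 ≤ j ∧ j < h) ∧ i = (q + j) * N + c := by
  unfold pvVert
  simp only [decide_eq_true_eq]
  constructor
  · rintro ⟨hm, h1, h2⟩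
    refine ⟨PySem.Int.floordiv (i - c) N - q, ⟨h1, h2⟩, ?_⟩
    have hd : N ∣ (i - c) := (PySem.Int.mod_eq_zero_iff_dvd _ _).mp hm
    have := PySem.Int.floordiv_mul_add_mod (i - c) N
    rw [hm] at this
    -- this : floordiv (i-c) N * N + 0 = i - c
    have : PySem.Int.floordiv (i - c) N * N = i - c := by omega
    nlinarith [this]
  · rintro ⟨j, ⟨h1, h2⟩, rfl⟩
    have hiq : (q + j) * N + c - c = (q + j) * N := by ring
    have hm : PySem.Int.mod ((q + j) * N + c - c) N = 0 := by
      rw [hiq, PySem.Int.mod_eq_zero_iff_dvd]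
      exact Dvd.intro_left _ rfl
    have hfd : PySem.Int.floordiv ((q + j) * N + c - c) N = q + j := by
      have h0 := PySem.Int.floordiv_mul_add_mod ((q + j) * N + c - c) N
      rw [hm] at h0
      rw [hiq] at h0 ⊢
      have := mul_right_cancel₀ hN (by omega : PySem.Int.floordiv ((q + j) * N) N * N = (q + j) * N)
      exact this
    refine ⟨hm, ?_, ?_⟩ <;> rw [hfd] <;> omega

theorem pvScan_map_range (i N q h c : Int) :
    pvScan i ((PySem.List.pyRange 0 h 1).map (fun j => (q + j) * N + c)) = true ↔
      ∃ j, (0 ≤ j ∧ j < h) ∧ i = (q + j) * N + c := by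
  rw [pvScan_eq_mem, List.mem_map]
  constructor
  · rintro ⟨j, hj, hji⟩
    exact ⟨j, by simpa [PySem.List.mem_pyRange_one] using hj, hji.symm⟩
  · rintro ⟨j, hj, hji⟩
    exact ⟨j, by simpa [PySem.List.mem_pyRange_one] using hj, hji.symm⟩

-- ===== VERDICT (by name: the statement is the Claim_ definition above) =====
theorem faraday_cage_spec : Claim_equal_faraday_cage := by
  intro i N _
  unfold Spec_faraday_cage faraday_cage faraday_cage_alt
  set q := PySem.Int.floordiv N 4 with hq
  set t := PySem.Int.floordiv (N*3) 4 with ht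
  set h := PySem.Int.floordiv N 2 with hh
  by_cases h1 : q * N + q ≤ i ∧ i < q * N + t
  · rw [if_pos ((pvScan_range i _ _).mpr h1), if_pos h1]
  · rw [if_neg (by rw [pvScan_range]; exact h1), if_neg h1]
    by_cases h2 : t * N + q ≤ i ∧ i < t * N + t
    · rw [if_pos ((pvScan_range i _ _).mpr h2), if_pos h2]
    · rw [if_neg (by rw [pvScan_range]; exact h2), if_neg h2]
      by_cases hN : N = 0
      · have hz : h = 0 := by rw [hh, hN]; decide
        rw [hz]
        simp [pvScan, PySem.List.pyRange_one_eq_nil (by omega : (0:Int) ≥ 0), hN]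
      · by_cases hL : pvVert i N q h q = true
        · rw [if_pos ((pvScan_map_range i N q h q).mpr ((pvVert_iff i N q h q hN).mp hL))]
          rw [if_pos ⟨hN, Or.inl hL⟩]
        · rw [if_neg (by rw [pvScan_map_range]; exact fun hex => hL ((pvVert_iff i N q h q hN).mpr hex))]
          by_cases hR : pvVert i N q h t = true
          · rw [if_pos ((pvScan_map_range i N q h t).mpr ((pvVert_iff i N q h t hN).mp hR))]
            rw [if_pos ⟨hN, Or.inr hR⟩]
          · rw [if_neg (by rw [pvScan_map_range]; exact fun hex => hR ((pvVert_iff i N q h t hN).mpr hex))]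
            rw [if_neg (by rintro ⟨-, hL' | hR'⟩; exact hL hL'; exact hR hR')]
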